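-- pv_equiv track=rewrite | github.com/Fengshawn/Document-Retrival | my_retriever.py | getCandidate
-- ===== SOURCE A (Python) =====
-- def getCandidate(dtc_dict,query):#docid - term - counts
--     candidate_dtc_dict={}
--     query_set = set(query.keys())
--     for docid in dtc_dict:
--         candidate_set = set(dtc_dict[docid])#{docid1:set(term1,term2...), ...}
--         if(len(query_set & candidate_set) > 0):
--             candidate_dtc_dict[docid] = dtc_dict[docid]
--     return candidate_dtc_dict
-- ===== SOURCE B (Python) =====
-- def getCandidate(dtc_dict, query):
--     # inverted index: term -> set of docids containing it
--     index = {}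
--     for docid, terms in dtc_dict.items():
--         for term in terms:
--             index.setdefault(term, set()).add(docid)
--     candidates = set()
--     for term in query:
--         if term in index:
--             candidates |= index[term]
--     return {docid: terms for docid, terms in dtc_dict.items() if docid in candidates}
-- ===== Notes on version B (the rewrite author's own statement) =====
-- stated objective: alternative
-- what changed: B builds an inverted index (term -> set of docids) in one pass, unions the index entries of the query's terms into a candidate set, and then filters dtc_dict in its original order, replacing A's per-document set construction and set intersection against the whole query.
import Mathlib
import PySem

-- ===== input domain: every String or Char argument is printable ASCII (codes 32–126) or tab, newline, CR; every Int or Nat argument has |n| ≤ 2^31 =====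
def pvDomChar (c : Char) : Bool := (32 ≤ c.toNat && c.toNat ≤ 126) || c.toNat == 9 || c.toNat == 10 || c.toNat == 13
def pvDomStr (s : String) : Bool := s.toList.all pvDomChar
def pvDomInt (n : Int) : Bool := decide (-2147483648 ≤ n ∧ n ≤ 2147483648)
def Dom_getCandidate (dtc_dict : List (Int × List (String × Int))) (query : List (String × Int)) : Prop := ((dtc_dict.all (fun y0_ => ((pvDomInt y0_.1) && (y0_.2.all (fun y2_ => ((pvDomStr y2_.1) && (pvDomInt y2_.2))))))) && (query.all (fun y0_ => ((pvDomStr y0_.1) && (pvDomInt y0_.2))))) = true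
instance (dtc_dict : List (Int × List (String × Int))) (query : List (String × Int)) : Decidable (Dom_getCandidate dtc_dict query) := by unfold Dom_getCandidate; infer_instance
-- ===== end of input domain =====

-- B replaces A's per-document set-intersection scan with an inverted index (term -> docid set)
-- plus one union over the query's terms and a final order-preserving filter (objective: alternative).




-- ===== PORT A =====
def getCandidate (dtc_dict : List (Int × List (String × Int))) (query : List (String × Int)) : List (Int × List (String × Int)) :=
  let query_set : PySem.Set String := PySem.Set.ofList (query.map Prod.fst)
  (dtc_dict.foldl
    (fun (acc : PySem.Dict Int (List (String × Int))) p =>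
      let candidate_set : PySem.Set String := PySem.Set.ofList (p.2.map Prod.fst)
      if (PySem.Set.inter query_set candidate_set).length > 0 then acc.insert p.1 p.2 else acc)
    PySem.Dict.empty).items

-- ===== PORT B =====
def getCandidate_alt (dtc_dict : List (Int × List (String × Int))) (query : List (String × Int)) : List (Int × List (String × Int)) :=
  let index : PySem.Dict String (PySem.Set Int) :=
    dtc_dict.foldl
      (fun d p => p.2.foldl (fun d t => d.modify t.1 PySem.Set.empty (fun s => PySem.Set.add s p.1)) d)
      PySem.Dict.empty
  let candidates : PySem.Set Int :=
    query.foldl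
      (fun c t => if index.contains t.1 then PySem.Set.union c (index.getD t.1 PySem.Set.empty) else c)
      PySem.Set.empty
  dtc_dict.filter (fun p => PySem.Set.contains candidates p.1)

-- ===== PRECONDITION & SPEC =====
-- Pre_ excludes association lists with duplicate outer docids: a Python dict cannot hold duplicate
-- keys (duplicates collapse to the last value), so such lists are not a faithful representation of
-- A's dict argument.
def Pre_getCandidate (dtc_dict : List (Int × List (String × Int))) (query : List (String × Int)) : Prop :=
  (dtc_dict.map Prod.fst).Nodup
instance (dtc_dict : List (Int × List (String × Int))) (query : List (String × Int)) : Decidable (Pre_getCandidate dtc_dict query) := by unfold Pre_getCandidate; infer_instance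
def pvWitness_getCandidate : (List (Int × List (String × Int))) × (List (String × Int)) :=
  ([(1, [("a", 1), ("b", 2)]), (2, [("c", 3)])], [("b", 5)])
def Spec_getCandidate (dtc_dict : List (Int × List (String × Int))) (query : List (String × Int)) (out : List (Int × List (String × Int))) : Prop := out = getCandidate_alt dtc_dict query
instance (dtc_dict : List (Int × List (String × Int))) (query : List (String × Int)) (out : List (Int × List (String × Int))) : Decidable (Spec_getCandidate dtc_dict query out) := by unfold Spec_getCandidate; infer_instance

-- ===== CLAIM (what is proved, stated in full; the proofs are below) =====
def Claim_equal_getCandidate : Prop := ∀ (dtc_dict : List (Int × List (String × Int))) (query : List (String × Int)), Dom_getCandidate dtc_dict query → Pre_getCandidate dtc_dict query → Spec_getCandidate dtc_dict query (getCandidate dtc_dict query)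

-- ===== LEMMAS AND PROOFS =====

-- membership in the per-document inner fold of B's index-building loop
theorem pv_mem_inner (terms : List (String × Int)) (docid : Int)
    (d : PySem.Dict String (PySem.Set Int)) (q : String) (x : Int) :
    x ∈ (terms.foldl (fun d t => d.modify t.1 PySem.Set.empty (fun s => PySem.Set.add s docid)) d).getD q PySem.Set.empty ↔
      x ∈ d.getD q PySem.Set.empty ∨ (q ∈ terms.map Prod.fst ∧ x = docid) := by
  induction terms generalizing d with
  | nil => simp
  | cons t ts ih =>
      simp only [List.foldl_cons, ih, PySem.Dict.getD_modify, List.map_cons, List.mem_cons]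
      by_cases h : q = t.1
      · subst h
        simp [PySem.Set.mem_add]
        tauto
      · rw [if_neg h]
        constructor
        · rintro (h1 | ⟨h2, h3⟩)
          · exact Or.inl h1
          · exact Or.inr ⟨Or.inr h2, h3⟩
        · rintro (h1 | ⟨h2 | h2, h3⟩)
          · exact Or.inl h1
          · exact absurd h2 h
          · exact Or.inr ⟨h2, h3⟩

-- membership in B's inverted index: docid x is indexed under term q iff some entry carries both
theorem pv_mem_index (l : List (Int × List (String × Int)))
    (d : PySem.Dict String (PySem.Set Int)) (q : String) (x : Int) :
    x ∈ (l.foldl (fun d p => p.2.foldl (fun d t => d.modify t.1 PySem.Set.empty (fun s => PySem.Set.add s p.1)) d) d).getD q PySem.Set.empty ↔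
      x ∈ d.getD q PySem.Set.empty ∨ ∃ p ∈ l, q ∈ p.2.map Prod.fst ∧ x = p.1 := by
  induction l generalizing d with
  | nil => simp
  | cons p ps ih =>
      simp only [List.foldl_cons, ih, pv_mem_inner, List.mem_cons]
      constructor
      · rintro ((h | h) | ⟨e, he, h⟩)
        · exact Or.inl h
        · exact Or.inr ⟨p, Or.inl rfl, h⟩
        · exact Or.inr ⟨e, Or.inr he, h⟩
      · rintro (h | ⟨e, he | he, h⟩)
        · exact Or.inl (Or.inl h)
        · subst he; exact Or.inl (Or.inr h)
        · exact Or.inr ⟨e, he, h⟩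

-- membership in B's candidate set accumulated over the query
theorem pv_mem_candidates (ql : List (String × Int)) (index : PySem.Dict String (PySem.Set Int))
    (c : PySem.Set Int) (x : Int) :
    x ∈ ql.foldl (fun c t => if index.contains t.1 then PySem.Set.union c (index.getD t.1 PySem.Set.empty) else c) c ↔
      x ∈ c ∨ ∃ t ∈ ql, x ∈ index.getD t.1 PySem.Set.empty := by
  induction ql generalizing c with
  | nil => simp
  | cons t ts ih =>
      simp only [List.foldl_cons, ih, List.mem_cons]
      by_cases h : index.contains t.1
      · rw [if_pos h, PySem.Set.mem_union]
        constructor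
        · rintro ((h1 | h1) | ⟨e, he, h1⟩)
          · exact Or.inl h1
          · exact Or.inr ⟨t, Or.inl rfl, h1⟩
          · exact Or.inr ⟨e, Or.inr he, h1⟩
        · rintro (h1 | ⟨e, he | he, h1⟩)
          · exact Or.inl (Or.inl h1)
          · subst he; exact Or.inl (Or.inr h1)
          · exact Or.inr ⟨e, he, h1⟩
      · rw [if_neg h]
        have hd : index.getD t.1 PySem.Set.empty = PySem.Set.empty :=
          PySem.Dict.getD_of_not_contains index PySem.Set.empty (by simpa using h)
        constructor
        · rintro (h1 | ⟨e, he, h1⟩)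
          · exact Or.inl h1
          · exact Or.inr ⟨e, Or.inr he, h1⟩
        · rintro (h1 | ⟨e, he | he, h1⟩)
          · exact Or.inl h1
          · exfalso; subst he; rw [hd] at h1; simp [PySem.Set.empty] at h1
          · exact Or.inr ⟨e, he, h1⟩

-- A's per-document test: the intersection of the two key sets is nonempty iff a key is shared
theorem pv_inter_pos (qs : List String) (ts : List String) :
    ((PySem.Set.inter (PySem.Set.ofList qs) (PySem.Set.ofList ts)).length > 0) ↔
      ∃ t ∈ qs, t ∈ ts := by
  rw [gt_iff_lt, List.length_pos_iff]
  constructor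
  · intro h
    obtain ⟨y, hy⟩ := List.exists_mem_of_ne_nil _ h
    have := (PySem.Set.mem_inter _ _ _).1 hy
    exact ⟨y, (PySem.Set.mem_ofList _ _).1 this.1, (PySem.Set.mem_ofList _ _).1 this.2⟩
  · rintro ⟨t, h1, h2⟩
    intro hnil
    have : t ∈ PySem.Set.inter (PySem.Set.ofList qs) (PySem.Set.ofList ts) :=
      (PySem.Set.mem_inter _ _ _).2 ⟨(PySem.Set.mem_ofList _ _).2 h1, (PySem.Set.mem_ofList _ _).2 h2⟩
    rw [hnil] at this; simp at this

-- ===== VERDICT (by name: the statement is the Claim_ definition above) =====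
theorem getCandidate_spec : Claim_equal_getCandidate := by
  intro dtc_dict query _ hpre
  unfold Spec_getCandidate getCandidate getCandidate_alt
  simp only []
  rw [PySem.List.foldl_ite_eq_foldl_filter]
  have hfresh := PySem.Dict.items_foldl_insert_fresh
      (dtc_dict.filter (fun x => decide (List.length
        ((PySem.Set.ofList (List.map Prod.fst query)).inter (PySem.Set.ofList (List.map Prod.fst x.2))) > 0)))
      Prod.fst Prod.snd PySem.Dict.empty
      (by intro a _; rfl)
      (hpre.sublist (List.filter_sublist.map Prod.fst))
  rw [hfresh]
  simp only [PySem.Dict.empty, List.nil_append]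
  rw [show (fun (a : Int × List (String × Int)) => (a.1, a.2)) = id from funext (fun a => rfl),
      List.map_id]
  apply List.filter_congr
  intro p hp
  rw [Bool.eq_iff_iff, decide_eq_true_eq]
  rw [show ∀ (C : PySem.Set Int), (PySem.Set.contains C p.1 = true) = (p.1 ∈ C) from
        fun C => by simp [PySem.Set.contains]]
  rw [pv_mem_candidates]
  rw [pv_inter_pos]
  constructor
  · rintro ⟨t, ht, htp⟩
    obtain ⟨tq, htq, rfl⟩ := List.mem_map.1 ht
    refine Or.inr ⟨tq, htq, ?_⟩
    rw [pv_mem_index]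
    exact Or.inr ⟨p, hp, htp, rfl⟩
  · rintro (h | ⟨tq, htq, h⟩)
    · simp [PySem.Set.empty] at h
    · rw [pv_mem_index] at h
      rcases h with h | ⟨e, he, hq, hxe⟩
      · simp [PySem.Dict.getD, PySem.Dict.get?] at h
      · have : e = p := List.inj_on_of_nodup_map hpre he hp hxe.symm
        subst this
        exact ⟨tq.1, List.mem_map_of_mem htq, hq⟩
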